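-- pv_equiv track=rewrite | github.com/Liliane-Top/LearningPython | venv/exercises/OpgavenH10B.py | next_string_2
-- ===== SOURCE A (Python) =====
-- def numstars(text):
--     count = 0
--     for symbol in text:
--         if symbol == "*":
--             count += 1
--     return count
--
-- def next_string_2(text):
--     wide_string = " " + text + " "
--     resultaat = ""
--     for i in range(1, len(wide_string) - 1):
--         i_en_buren = wide_string[i - 1:i + 2]
--         num_stars = numstars(i_en_buren)
--         if num_stars == 1:
--             resultaat += "*"
--         else:
--             resultaat += "1"
--     return resultaat
-- ===== SOURCE B (Python) =====
-- def next_string_2(text):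
--     wide_string = " " + text + " "
--     prefix = [0]
--     for ch in wide_string:
--         prefix.append(prefix[-1] + (ch == "*"))
--     return "".join("*" if prefix[i + 2] - prefix[i - 1] == 1 else "1"
--                    for i in range(1, len(wide_string) - 1))
-- ===== Notes on version B (the rewrite author's own statement) =====
-- stated objective: faster
-- what changed: Replaces per-position 3-character substring extraction and a star-counting helper by a prefix-count table built in one pass, each output character decided by a subtraction of two table entries.
import Mathlib
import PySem

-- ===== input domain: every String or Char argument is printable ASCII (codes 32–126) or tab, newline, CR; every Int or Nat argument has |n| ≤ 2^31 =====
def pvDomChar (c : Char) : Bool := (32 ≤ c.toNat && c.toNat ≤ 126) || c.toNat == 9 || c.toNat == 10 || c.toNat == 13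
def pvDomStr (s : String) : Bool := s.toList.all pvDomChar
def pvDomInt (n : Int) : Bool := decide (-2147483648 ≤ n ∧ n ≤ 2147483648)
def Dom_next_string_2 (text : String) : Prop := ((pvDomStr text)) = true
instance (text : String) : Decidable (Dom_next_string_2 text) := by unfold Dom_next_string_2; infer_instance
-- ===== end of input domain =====

-- B replaces A's per-position 3-character substring scan by a prefix star-count table
-- built in one pass, each output char decided by a subtraction (objective: faster; measured).

-- ===== PORT A =====
def pvNumstars (text : List Char) : Int :=
  text.foldl (fun count symbol => if symbol = '*' then count + 1 else count) 0

def next_string_2 (text : String) : String :=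
  let wide_string : List Char := ' ' :: text.toList ++ [' ']
  let resultaat : List Char := (PySem.List.pyRange 1 ((wide_string.length : Int) - 1) 1).foldl
    (fun resultaat i =>
      let i_en_buren := PySem.List.slice wide_string (some (i - 1)) (some (i + 2))
      let num_stars := pvNumstars i_en_buren
      if num_stars = 1 then resultaat ++ ['*'] else resultaat ++ ['1']) []
  String.mk resultaat

-- ===== PORT B =====
def pvPrefix (wide : List Char) : List Int :=
  wide.foldl (fun P ch => P ++ [PySem.List.pyGetD P (-1) 0 + (if ch = '*' then 1 else 0)]) [0]

def next_string_2_alt (text : String) : String :=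
  let wide_string : List Char := ' ' :: text.toList ++ [' ']
  let pfx := pvPrefix wide_string
  String.mk ((PySem.List.pyRange 1 ((wide_string.length : Int) - 1) 1).map
    (fun i => if PySem.List.pyGetD pfx (i + 2) 0 - PySem.List.pyGetD pfx (i - 1) 0 = 1
              then '*' else '1'))

-- ===== PRECONDITION & SPEC =====
def Spec_next_string_2 (text : String) (out : String) : Prop := out = next_string_2_alt text
instance (text : String) (out : String) : Decidable (Spec_next_string_2 text out) := by unfold Spec_next_string_2; infer_instance

-- ===== CLAIM (what is proved, stated in full; the proofs are below) =====
def Claim_equal_next_string_2 : Prop := ∀ (text : String), Dom_next_string_2 text → Spec_next_string_2 text (next_string_2 text)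

-- ===== LEMMAS AND PROOFS =====

def pvCnt (l : List Char) : Int := (l.countP (fun c => decide (c = '*')) : Int)

theorem pvNumstars_eq (l : List Char) : pvNumstars l = pvCnt l := by
  unfold pvNumstars pvCnt
  rw [PySem.List.foldl_ite_add_one (fun c => c = '*')]
  simp

theorem pvPrefix_eq (l : List Char) :
    pvPrefix l = (List.range (l.length + 1)).map (fun j => pvCnt (l.take j)) := by
  induction l using List.reverseRecOn with
  | nil => simp [pvPrefix, pvCnt]
  | append_singleton l c ih =>
    unfold pvPrefix at *
    rw [List.foldl_append, ih, List.foldl_cons, List.foldl_nil]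
    have hlast : PySem.List.pyGetD ((List.range (l.length + 1)).map (fun j => pvCnt (l.take j))) (-1) 0
        = pvCnt l := by
      rw [List.range_succ, List.map_append]
      simp [PySem.List.pyGetD_neg_one_append_singleton]
    rw [hlast,
      show (l ++ [c]).length + 1 = (l.length + 1) + 1 from by simp,
      show List.range (l.length + 1 + 1) = List.range (l.length + 1) ++ [l.length + 1] from
        List.range_succ,
      List.map_append]
    congr 1
    · apply List.map_congr_left
      intro j hj
      rw [List.mem_range] at hj
      rw [List.take_append_of_le_length (by omega)]
    · have htk : List.take (l.length + 1) (l ++ [c]) = l ++ [c] :=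
        List.take_of_length_le (by simp)
      simp only [List.map_cons, List.map_nil, htk, pvCnt, List.countP_append]
      by_cases h : c = '*' <;> simp [h]

theorem pvPrefix_getD (l : List Char) (j : Nat) (hj : j < l.length + 1) :
    PySem.List.pyGetD (pvPrefix l) ((j : Int)) 0 = pvCnt (l.take j) := by
  rw [pvPrefix_eq, PySem.List.pyGetD_natCast, List.getD_eq_getElem?_getD]
  simp [hj]

theorem pv_pointwise (wide : List Char) (i : Int) (h1 : 1 ≤ i) (h2 : i < (wide.length : Int) - 1) :
    (if pvNumstars (PySem.List.slice wide (some (i - 1)) (some (i + 2))) = 1 then '*' else '1')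
      = (if PySem.List.pyGetD (pvPrefix wide) (i + 2) 0
             - PySem.List.pyGetD (pvPrefix wide) (i - 1) 0 = 1 then '*' else '1') := by
  obtain ⟨k, rfl⟩ : ∃ k : Nat, i = (k : Int) := ⟨i.toNat, (Int.toNat_of_nonneg (by omega)).symm⟩
  have hk1 : 1 ≤ k := by exact_mod_cast h1
  have hk2 : k + 2 ≤ wide.length := by omega
  have e1 : (k : Int) + 2 = ((k + 2 : Nat) : Int) := by push_cast; ring
  have e2 : (k : Int) - 1 = ((k - 1 : Nat) : Int) := by omega
  rw [e1, e2, pvPrefix_getD _ _ (by omega), pvPrefix_getD _ _ (by omega),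
    PySem.List.slice_natCast, pvNumstars_eq,
    show k + 2 - (k - 1) = 3 from by omega]
  have hsplit : wide.take (k + 2) = wide.take (k - 1) ++ (wide.drop (k - 1)).take 3 := by
    rw [← List.take_add]
    congr 1
    omega
  rw [hsplit,
    show pvCnt (wide.take (k - 1) ++ (wide.drop (k - 1)).take 3)
        = pvCnt (wide.take (k - 1)) + pvCnt ((wide.drop (k - 1)).take 3) from by
      simp [pvCnt, List.countP_append],
    show pvCnt (wide.take (k - 1)) + pvCnt ((wide.drop (k - 1)).take 3)
        - pvCnt (wide.take (k - 1)) = pvCnt ((wide.drop (k - 1)).take 3) from by ring]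

theorem pv_foldlA (wide : List Char) (rng : List Int) (acc : List Char) :
    rng.foldl (fun resultaat i =>
        let i_en_buren := PySem.List.slice wide (some (i - 1)) (some (i + 2))
        let num_stars := pvNumstars i_en_buren
        if num_stars = 1 then resultaat ++ ['*'] else resultaat ++ ['1']) acc
      = acc ++ rng.map (fun i =>
          if pvNumstars (PySem.List.slice wide (some (i - 1)) (some (i + 2))) = 1
          then '*' else '1') := by
  induction rng generalizing acc with
  | nil => simp
  | cons i t ih =>
    simp only [List.foldl_cons, List.map_cons]
    by_cases h : pvNumstars (PySem.List.slice wide (some (i - 1)) (some (i + 2))) = 1 <;>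
      simp [h, ih]

theorem next_string_2_eq (text : String) : next_string_2 text = next_string_2_alt text := by
  simp only [next_string_2, next_string_2_alt]
  rw [pv_foldlA]
  simp only [List.nil_append]
  congr 1
  apply List.map_congr_left
  intro i hi
  rw [PySem.List.mem_pyRange_one] at hi
  exact pv_pointwise _ i hi.1 hi.2

-- ===== VERDICT (by name: the statement is the Claim_ definition above) =====
theorem next_string_2_spec : Claim_equal_next_string_2 := by
  intro text _
  unfold Spec_next_string_2
  exact next_string_2_eq text
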